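-- pv_equiv track=rewrite | github.com/odylith/odylith | src/odylith/runtime/common/diagram_freshness.py | normalize_mermaid_render_source
-- ===== SOURCE A (Python) =====
-- def normalize_mermaid_render_source(definition: str) -> str:
--     """Return a render-semantic Mermaid source string.
--
--     Mermaid review comments (`%% ...`) and trailing whitespace should not force
--     a full SVG/PNG rebuild when the rendered topology is otherwise unchanged.
--     """
--
--     lines: list[str] = []
--     for raw_line in str(definition or "").replace("\r\n", "\n").replace("\r", "\n").split("\n"):
--         stripped = raw_line.lstrip()
--         if stripped.startswith("%%"):
--             continue
--         lines.append(raw_line.rstrip())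
--     while lines and not lines[0].strip():
--         lines.pop(0)
--     while lines and not lines[-1].strip():
--         lines.pop()
--     if not lines:
--         return ""
--     return "\n".join(lines) + "\n"
-- ===== SOURCE B (Python) =====
-- def _end_of_line(out, pending, raw):
--     """Handle one completed line of the streaming scan."""
--     if raw.lstrip().startswith("%%"):
--         return out, pending
--     body = raw.rstrip()
--     if body:
--         return out + "\n" * pending + body + "\n", 0
--     if out:
--         return out, pending + 1
--     return out, pending
--
-- def normalize_mermaid_render_source(definition: str) -> str:
--     # Single streaming pass over the characters: emit each significant line as
--     # soon as it ends, buffering interior blank lines in a pending counter, so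
--     # no line list is built and no edge trimming pass is needed.
--     text = str(definition or "").replace("\r\n", "\n").replace("\r", "\n")
--     out = ""
--     pending = 0
--     line = ""
--     for ch in text + "\n":
--         if ch != "\n":
--             line += ch
--             continue
--         raw, line = line, ""
--         out, pending = _end_of_line(out, pending, raw)
--     return out
-- ===== Notes on version B (the rewrite author's own statement) =====
-- stated objective: alternative
-- what changed: B replaces A's staged pipeline (split into a line list, filter comments, two edge pop-loops, join) by a single streaming pass over the characters that emits each significant line as soon as it ends, buffering interior blank lines in a pending counter so no line list is built and no edge-trimming pass exists.
import Mathlib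
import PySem

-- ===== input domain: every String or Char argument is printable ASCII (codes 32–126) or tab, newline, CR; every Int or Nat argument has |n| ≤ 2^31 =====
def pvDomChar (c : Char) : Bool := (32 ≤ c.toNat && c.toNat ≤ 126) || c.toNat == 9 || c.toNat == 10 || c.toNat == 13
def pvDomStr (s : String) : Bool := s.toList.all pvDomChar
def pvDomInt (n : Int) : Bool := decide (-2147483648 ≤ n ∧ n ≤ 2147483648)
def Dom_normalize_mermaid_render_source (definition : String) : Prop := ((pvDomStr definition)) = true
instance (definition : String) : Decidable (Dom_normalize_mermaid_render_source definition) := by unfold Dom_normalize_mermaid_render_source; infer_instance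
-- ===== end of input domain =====

-- B replaces A's staged pipeline (split into a line list, filter, two edge pop-loops, join)
-- by a single streaming scan over the characters that emits each significant line as it ends,
-- buffering interior blank lines in a pending counter (alternative decomposition).

-- ===== PORT A =====
-- the for-loop building `lines` (append unless the lstripped line starts with "%%")
def pvA_keep (raws : List (List Char)) : List (List Char) :=
  raws.foldl (fun lines raw =>
    if PySem.Chars.startswith (PySem.Chars.lstrip raw) ['%', '%']
    then lines
    else lines ++ [PySem.Chars.rstrip raw]) []

-- `not line.strip()` — the blank test of the two while loops
def pvA_blank (l : List Char) : Bool := PySem.Chars.strip l == []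

def normalize_mermaid_render_source (definition : String) : String :=
  let text := PySem.Chars.replace (PySem.Chars.replace definition.toList ['\r', '\n'] ['\n']) ['\r'] ['\n']
  let lines := pvA_keep (PySem.Chars.splitOn text ['\n'])
  -- while lines and not lines[0].strip(): lines.pop(0)
  let lines := lines.dropWhile pvA_blank
  -- while lines and not lines[-1].strip(): lines.pop()
  let lines := (lines.reverse.dropWhile pvA_blank).reverse
  if lines.isEmpty then String.ofList [] else String.ofList (PySem.Chars.join ['\n'] lines ++ ['\n'])

-- ===== PORT B =====
-- the body/blank branches of `_end_of_line` after the comment test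
-- ("\n" * pending is List.replicate pending '\n'; pending is a nonnegative counter)
def pvB_emit (st : List Char × Nat) (body : List Char) : List Char × Nat :=
  if body ≠ [] then (st.1 ++ List.replicate st.2 '\n' ++ body ++ ['\n'], 0)
  else if st.1 ≠ [] then (st.1, st.2 + 1) else st

-- `_end_of_line(out, pending, raw)`
def pvB_line (st : List Char × Nat) (raw : List Char) : List Char × Nat :=
  if PySem.Chars.startswith (PySem.Chars.lstrip raw) ['%', '%'] then st
  else pvB_emit st (PySem.Chars.rstrip raw)

-- one iteration of the `for ch in text + "\n"` loop; state ((out, pending), line)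
def pvB_step (st : (List Char × Nat) × List Char) (ch : Char) : (List Char × Nat) × List Char :=
  if ch ≠ '\n' then (st.1, st.2 ++ [ch])
  else (pvB_line st.1 st.2, [])

def normalize_mermaid_render_source_alt (definition : String) : String :=
  let text := PySem.Chars.replace (PySem.Chars.replace definition.toList ['\r', '\n'] ['\n']) ['\r'] ['\n']
  let st := (text ++ ['\n']).foldl pvB_step (([], 0), [])
  String.ofList st.1.1

-- ===== PRECONDITION & SPEC =====
def Spec_normalize_mermaid_render_source (definition : String) (out : String) : Prop := out = normalize_mermaid_render_source_alt definition
instance (definition : String) (out : String) : Decidable (Spec_normalize_mermaid_render_source definition out) := by unfold Spec_normalize_mermaid_render_source; infer_instance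

-- ===== CLAIM =====
def Claim_equal_normalize_mermaid_render_source : Prop := ∀ (definition : String), Dom_normalize_mermaid_render_source definition → Spec_normalize_mermaid_render_source definition (normalize_mermaid_render_source definition)

-- ===== LEMMAS AND PROOFS =====

-- "prepend to the first piece" (splitOn's accumulator shape)
def pvPF (x : List Char) : List (List Char) → List (List Char)
  | [] => [x]
  | h :: t => (x ++ h) :: t

theorem pvPF_pvPF (x y : List Char) (P : List (List Char)) :
    pvPF x (pvPF y P) = pvPF (x ++ y) P := by
  cases P <;> simp [pvPF]

-- characterisation of splitOn.go for the separator "\n"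
theorem pv_go_eq (fuel : Nat) : ∀ (l cur : List Char) (acc : List (List Char)),
    l.length < fuel →
    PySem.Chars.splitOn.go ['\n'] fuel l cur acc
      = acc.reverse ++ pvPF cur.reverse (PySem.Chars.splitOn l ['\n']) := by
  induction fuel using Nat.strong_induction_on with
  | _ fuel ih =>
    intro l cur acc hf
    cases fuel with
    | zero => omega
    | succ f =>
      match l with
      | [] =>
        simp [PySem.Chars.splitOn.go, PySem.Chars.splitOn, pvPF]
      | c :: rest =>
        rw [PySem.Chars.splitOn.go]
        by_cases hc : c = '\n'
        · subst hc
          rw [if_pos (by simp [List.isPrefixOf])]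
          rw [show List.drop (['\n'] : List Char).length ('\n' :: rest) = rest from rfl]
          rw [ih f (by omega) rest [] (cur.reverse :: acc) (by simp at hf; omega)]
          have hs : PySem.Chars.splitOn ('\n' :: rest) ['\n'] = [] :: pvPF [] (PySem.Chars.splitOn rest ['\n']) := by
            show PySem.Chars.splitOn.go ['\n'] ((rest.length + 1) + 1) ('\n' :: rest) [] [] = _
            rw [PySem.Chars.splitOn.go, if_pos (by simp [List.isPrefixOf])]
            rw [show List.drop (['\n'] : List Char).length ('\n' :: rest) = rest from rfl]
            simp only [List.reverse_nil]
            rw [ih (rest.length + 1) (by simp at hf; omega) rest [] [[]] (by omega)]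
            rfl
          rw [hs]
          cases hP : PySem.Chars.splitOn rest ['\n'] <;> simp [pvPF]
        · rw [if_neg (by simp [List.isPrefixOf]; exact fun h => hc h.symm)]
          rw [ih f (by omega) rest (c :: cur) acc (by simp at hf; omega)]
          have hs : PySem.Chars.splitOn (c :: rest) ['\n'] = pvPF [c] (PySem.Chars.splitOn rest ['\n']) := by
            show PySem.Chars.splitOn.go ['\n'] ((rest.length + 1) + 1) (c :: rest) [] [] = _
            rw [PySem.Chars.splitOn.go, if_neg (by simp [List.isPrefixOf]; exact fun h => hc h.symm)]
            rw [ih (rest.length + 1) (by simp at hf; omega) rest [c] [] (by omega)]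
            rfl
          rw [hs, pvPF_pvPF]
          simp

-- splitOn is never empty (so pvPF [] is the identity on it)
theorem pv_splitOn_shape (l : List Char) :
    ∃ h t, PySem.Chars.splitOn l ['\n'] = h :: t := by
  have := pv_go_eq (l.length + 1) l [] [] (by omega)
  rw [show PySem.Chars.splitOn.go ['\n'] (l.length + 1) l [] [] = PySem.Chars.splitOn l ['\n'] from rfl] at this
  cases hP : PySem.Chars.splitOn l ['\n'] with
  | nil => rw [hP] at this; simp [pvPF] at this
  | cons h t => exact ⟨h, t, rfl⟩

theorem pv_splitOn_nil : PySem.Chars.splitOn ([] : List Char) ['\n'] = [[]] := by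
  show PySem.Chars.splitOn.go ['\n'] 1 [] [] [] = [[]]
  simp [PySem.Chars.splitOn.go]

theorem pv_splitOn_cons_nl (rest : List Char) :
    PySem.Chars.splitOn ('\n' :: rest) ['\n'] = [] :: PySem.Chars.splitOn rest ['\n'] := by
  show PySem.Chars.splitOn.go ['\n'] ((rest.length + 1) + 1) ('\n' :: rest) [] [] = _
  rw [PySem.Chars.splitOn.go, if_pos (by simp [List.isPrefixOf])]
  rw [show List.drop (['\n'] : List Char).length ('\n' :: rest) = rest from rfl]
  simp only [List.reverse_nil]
  rw [pv_go_eq (rest.length + 1) rest [] [[]] (by omega)]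
  obtain ⟨h, t, hP⟩ := pv_splitOn_shape rest
  simp [hP, pvPF]

theorem pv_splitOn_cons (c : Char) (rest : List Char) (hc : c ≠ '\n') :
    PySem.Chars.splitOn (c :: rest) ['\n'] = pvPF [c] (PySem.Chars.splitOn rest ['\n']) := by
  show PySem.Chars.splitOn.go ['\n'] ((rest.length + 1) + 1) (c :: rest) [] [] = _
  rw [PySem.Chars.splitOn.go, if_neg (by simp [List.isPrefixOf]; exact fun h => hc h.symm)]
  rw [pv_go_eq (rest.length + 1) rest [c] [] (by omega)]
  rfl

-- the character scan is the line fold over splitOn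
theorem pv_scan (cs : List Char) : ∀ (st : List Char × Nat) (line : List Char),
    (cs ++ ['\n']).foldl pvB_step (st, line)
      = ((pvPF line (PySem.Chars.splitOn cs ['\n'])).foldl pvB_line st, ([] : List Char)) := by
  induction cs with
  | nil =>
    intro st line
    simp [pv_splitOn_nil, pvPF, pvB_step]
  | cons c cs' ih =>
    intro st line
    by_cases hc : c = '\n'
    · subst hc
      rw [pv_splitOn_cons_nl]
      have : pvB_step (st, line) '\n' = (pvB_line st line, []) := by simp [pvB_step]
      simp only [List.cons_append, List.foldl_cons, this, ih]
      obtain ⟨h, t, hP⟩ := pv_splitOn_shape cs'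
      simp [hP, pvPF]
    · rw [pv_splitOn_cons c cs' hc]
      have : pvB_step (st, line) c = (st, line ++ [c]) := by simp [pvB_step, hc]
      simp only [List.cons_append, List.foldl_cons, this, ih, pvPF_pvPF]

-- the line fold is the emit fold over the filtered, rstripped lines
theorem pv_lineFold (raws : List (List Char)) : ∀ (st : List Char × Nat),
    raws.foldl pvB_line st
      = ((raws.filter (fun l => !PySem.Chars.startswith (PySem.Chars.lstrip l) ['%', '%'])).map
          PySem.Chars.rstrip).foldl pvB_emit st := by
  induction raws with
  | nil => intro st; rfl
  | cons r rs ih =>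
    intro st
    by_cases hr : PySem.Chars.startswith (PySem.Chars.lstrip r) ['%', '%'] = true
    · simp [pvB_line, hr, ih]
    · simp [pvB_line, hr, ih]

-- each line of the output, with its terminating newline
def pvEmitted (T : List (List Char)) : List Char := T.flatMap (fun l => l ++ ['\n'])

theorem pvEmitted_nil_iff (T : List (List Char)) : pvEmitted T = [] ↔ T = [] := by
  cases T <;> simp [pvEmitted]

theorem pvEmitted_append (T U : List (List Char)) :
    pvEmitted (T ++ U) = pvEmitted T ++ pvEmitted U := by
  simp [pvEmitted]

theorem pvEmitted_rep (p : Nat) : pvEmitted (List.replicate p []) = List.replicate p '\n' := by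
  induction p with
  | zero => rfl
  | succ p ih => simp [List.replicate_succ, pvEmitted] at ih ⊢; simpa using ih

-- abstract version of the emit fold: track the emitted lines instead of the flat output
def pvAbs (st : List (List Char) × Nat) (s : List Char) : List (List Char) × Nat :=
  if s ≠ [] then (st.1 ++ List.replicate st.2 [] ++ [s], 0)
  else if st.1 ≠ [] then (st.1, st.2 + 1) else st

theorem pv_sim (K : List (List Char)) : ∀ (T : List (List Char)) (p : Nat),
    K.foldl pvB_emit (pvEmitted T, p)
      = (pvEmitted (K.foldl pvAbs (T, p)).1, (K.foldl pvAbs (T, p)).2) := by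
  induction K with
  | nil => intro T p; rfl
  | cons s K' ih =>
    intro T p
    by_cases hs : s = []
    · subst hs
      by_cases hT : T = []
      · subst hT
        have h1 : pvB_emit (pvEmitted [], p) [] = (pvEmitted [], p) := by
          simp [pvB_emit, pvEmitted]
        have h2 : pvAbs (([] : List (List Char)), p) [] = ([], p) := by simp [pvAbs]
        simp only [List.foldl_cons, h1, h2, ih]
      · have hne : pvEmitted T ≠ [] := fun h => hT ((pvEmitted_nil_iff T).mp h)
        have h1 : pvB_emit (pvEmitted T, p) [] = (pvEmitted T, p + 1) := by
          simp [pvB_emit, hne]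
        have h2 : pvAbs (T, p) [] = (T, p + 1) := by simp [pvAbs, hT]
        simp only [List.foldl_cons, h1, h2, ih]
    · have h1 : pvB_emit (pvEmitted T, p) s
          = (pvEmitted (T ++ List.replicate p [] ++ [s]), 0) := by
        simp [pvB_emit, hs, pvEmitted_append, pvEmitted_rep]
        simp [pvEmitted]
      have h2 : pvAbs (T, p) s = (T ++ List.replicate p [] ++ [s], 0) := by simp [pvAbs, hs]
      simp only [List.foldl_cons, h1, h2, ih]

-- drop trailing empty lines
def pvTrimR (K : List (List Char)) : List (List Char) :=
  (K.reverse.dropWhile List.isEmpty).reverse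

theorem pvTrimR_cons (s : List Char) (K : List (List Char)) :
    pvTrimR (s :: K)
      = if pvTrimR K = [] then (if s = [] then [] else [s]) else s :: pvTrimR K := by
  unfold pvTrimR
  rw [List.reverse_cons, List.dropWhile_append]
  by_cases hK : List.dropWhile List.isEmpty K.reverse = []
  · rw [hK]
    by_cases hs : s = [] <;> simp [hs]
  · simp [hK]

theorem pv_abs_main (K : List (List Char)) : ∀ (T : List (List Char)) (p : Nat), T ≠ [] →
    (K.foldl pvAbs (T, p)).1
      = if pvTrimR K = [] then T else T ++ List.replicate p [] ++ pvTrimR K := by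
  induction K with
  | nil => intro T p _; simp [pvTrimR]
  | cons s K' ih =>
    intro T p hT
    by_cases hs : s = []
    · subst hs
      have h2 : pvAbs (T, p) [] = (T, p + 1) := by simp [pvAbs, hT]
      rw [List.foldl_cons, h2, ih T (p + 1) hT, pvTrimR_cons]
      by_cases hK : pvTrimR K' = []
      · simp [hK]
      · simp [hK]
        rw [List.replicate_succ']
        simp
    · have h2 : pvAbs (T, p) s = (T ++ List.replicate p [] ++ [s], 0) := by simp [pvAbs, hs]
      rw [List.foldl_cons, h2, ih _ 0 (by simp), pvTrimR_cons]
      by_cases hK : pvTrimR K' = []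
      · simp [hK, hs]
      · simp [hK]

theorem pv_abs_lead (K : List (List Char)) :
    K.foldl pvAbs ([], 0) = (K.dropWhile List.isEmpty).foldl pvAbs ([], 0) := by
  induction K with
  | nil => rfl
  | cons s K' ih =>
    by_cases hs : s = []
    · subst hs
      rw [List.foldl_cons, show pvAbs ([], 0) [] = ([], 0) by simp [pvAbs],
        List.dropWhile_cons_of_pos (by simp), ih]
    · rw [List.dropWhile_cons_of_neg (by simp [hs])]

-- the abstract fold from the start state computes exactly A's trimmed line list
theorem pv_abs_total (K : List (List Char)) :
    (K.foldl pvAbs ([], 0)).1 = pvTrimR (K.dropWhile List.isEmpty) := by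
  rw [pv_abs_lead]
  cases hM : K.dropWhile List.isEmpty with
  | nil => simp [pvTrimR]
  | cons s M' =>
    have hs : s ≠ [] := by
      have h := List.head_dropWhile_not List.isEmpty (l := K) (by rw [hM]; simp)
      simp only [hM, List.head_cons] at h
      simpa using h
    rw [List.foldl_cons, show pvAbs ([], 0) s = ([s], 0) by simp [pvAbs, hs],
      pv_abs_main M' [s] 0 (by simp), pvTrimR_cons]
    by_cases hK : pvTrimR M' = [] <;> simp [hK, hs]

-- join with "\n" plus a final "\n" is the flat emitted form
theorem pv_join_emit (T : List (List Char)) (hT : T ≠ []) :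
    PySem.Chars.join ['\n'] T ++ ['\n'] = pvEmitted T := by
  induction T with
  | nil => simp at hT
  | cons a t ih =>
    cases t with
    | nil => simp [PySem.Chars.join_singleton, pvEmitted]
    | cons b ts =>
      rw [PySem.Chars.join_cons_cons]
      have := ih (by simp)
      simp [pvEmitted] at this ⊢
      simp [this]

-- ported from the previous development: A's foldl builds filter-then-map
theorem pv_keep_eq (raws : List (List Char)) :
    pvA_keep raws =
      (raws.filter (fun line => !PySem.Chars.startswith (PySem.Chars.lstrip line) ['%', '%'])).map
        PySem.Chars.rstrip := by
  unfold pvA_keep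
  have h : (fun (lines : List (List Char)) (raw : List Char) =>
      if PySem.Chars.startswith (PySem.Chars.lstrip raw) ['%', '%'] then lines
      else lines ++ [PySem.Chars.rstrip raw]) =
      (fun lines raw =>
      if (!PySem.Chars.startswith (PySem.Chars.lstrip raw) ['%', '%']) = true then lines ++ [PySem.Chars.rstrip raw]
      else lines) := by
    funext lines raw
    by_cases hb : PySem.Chars.startswith (PySem.Chars.lstrip raw) ['%', '%'] = true <;> simp [hb]
  rw [h, PySem.List.foldl_append_if]
  simp

theorem pv_strip_nil_isspace (y : List Char) (h : PySem.Chars.strip y = []) :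
    ∀ a ∈ y, PySem.Chars.isspace a = true := by
  simp [PySem.Chars.strip, PySem.Chars.rstrip, PySem.Chars.lstrip] at h
  intro a ha
  rcases (List.takeWhile_append_dropWhile (p := PySem.Chars.isspace) (l := y)) ▸ List.mem_append.mp ((List.takeWhile_append_dropWhile (p := PySem.Chars.isspace) (l := y)).symm ▸ ha) with h1 | h1
  · exact List.mem_takeWhile_imp h1
  · exact h a (by simpa using h1)

-- on an rstripped line, "strip is empty" is "the line is empty"
theorem pv_blank_rstrip (l : List Char) :
    pvA_blank (PySem.Chars.rstrip l) = (PySem.Chars.rstrip l).isEmpty := by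
  rcases h : List.dropWhile PySem.Chars.isspace l.reverse with _ | ⟨c, cs⟩
  · simp [pvA_blank, PySem.Chars.strip, PySem.Chars.rstrip, PySem.Chars.lstrip, h]
  · have hc : PySem.Chars.isspace c = false := by
      have := List.head_dropWhile_not PySem.Chars.isspace (l := l.reverse) (by simp [h])
      simpa [h] using this
    have hne : pvA_blank (PySem.Chars.rstrip l) = false := by
      rw [Bool.eq_false_iff]
      intro hb
      have hs : PySem.Chars.strip (PySem.Chars.rstrip l) = [] := by
        simpa [pvA_blank] using hb
      have := pv_strip_nil_isspace _ hs c (by simp [PySem.Chars.rstrip, h])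
      simp [hc] at this
    rw [hne]
    simp [PySem.Chars.rstrip, h]

theorem pv_dropWhile_congr (p q : List Char → Bool) (l : List (List Char))
    (h : ∀ x ∈ l, p x = q x) : l.dropWhile p = l.dropWhile q := by
  induction l with
  | nil => rfl
  | cons a t ih =>
    have ha := h a (by simp)
    by_cases hp : p a = true
    · rw [List.dropWhile_cons_of_pos hp, List.dropWhile_cons_of_pos (ha ▸ hp),
        ih (fun x hx => h x (List.mem_cons_of_mem _ hx))]
    · rw [List.dropWhile_cons_of_neg hp, List.dropWhile_cons_of_neg (ha ▸ hp)]

-- ===== VERDICT =====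
set_option maxHeartbeats 1000000 in
theorem normalize_mermaid_render_source_spec : Claim_equal_normalize_mermaid_render_source := by
  intro definition _
  unfold Spec_normalize_mermaid_render_source normalize_mermaid_render_source normalize_mermaid_render_source_alt
  simp only []
  set text := PySem.Chars.replace (PySem.Chars.replace definition.toList ['\r', '\n'] ['\n']) ['\r'] ['\n'] with htext
  set kept := ((PySem.Chars.splitOn text ['\n']).filter
      (fun line => !PySem.Chars.startswith (PySem.Chars.lstrip line) ['%', '%'])).map PySem.Chars.rstrip with hkept
  -- B's side: scan = line fold = emit fold = emitted (abstract fold) = emitted (trimR (dropWhile kept))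
  have hB : ((text ++ ['\n']).foldl pvB_step (([], 0), [])).1.1
      = pvEmitted (pvTrimR (kept.dropWhile List.isEmpty)) := by
    rw [pv_scan text ([], 0) []]
    obtain ⟨h, t, hP⟩ := pv_splitOn_shape text
    rw [hP, show pvPF [] (h :: t) = h :: t by simp [pvPF], ← hP, pv_lineFold, ← hkept]
    have := pv_sim kept [] 0
    rw [show pvEmitted [] = [] from rfl] at this
    rw [this]
    simp only []
    rw [pv_abs_total]
  rw [hB]
  -- A's side: the two blank trims are the isEmpty trims on kept
  rw [pv_keep_eq, ← hkept]
  have hblank : ∀ l ∈ kept, pvA_blank l = l.isEmpty := by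
    intro l hl
    rw [hkept] at hl
    obtain ⟨raw, _, rfl⟩ := List.mem_map.mp hl
    exact pv_blank_rstrip raw
  set M := kept.dropWhile List.isEmpty with hM
  have hA1 : kept.dropWhile pvA_blank = M := by
    rw [hM]; exact pv_dropWhile_congr _ _ _ hblank
  have hMsub : ∀ l ∈ M, l ∈ kept := by
    intro l hl
    rw [hM] at hl
    exact (List.dropWhile_suffix _).sublist.mem hl
  have hA2 : (M.reverse.dropWhile pvA_blank).reverse = pvTrimR M := by
    rw [pvTrimR, pv_dropWhile_congr pvA_blank List.isEmpty M.reverse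
      (fun x hx => hblank x (hMsub x (List.mem_reverse.mp hx)))]
  rw [hA1, hA2]
  by_cases hT : pvTrimR M = []
  · simp [hT, pvEmitted]
  · rw [if_neg (by simp [List.isEmpty_iff, hT])]
    rw [pv_join_emit _ hT]
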